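-- pv_equiv track=rewrite | github.com/hyung6370/cppAtoZ | Programmers/Lv_1/모의고사.py | solution
-- ===== SOURCE A (Python) =====
-- def solution(answers):
--     one = [1, 2, 3, 4, 5]
--     two = [2, 1, 2, 3, 2, 4, 2, 5]
--     thr = [3, 3, 1, 1, 2, 2, 4, 4, 5, 5]
--
--     score = [0, 0, 0]
--     result = []
--
--     for idx, answer in enumerate(answers):
--         if answer == one[idx % len(one)]:
--             score[0] += 1
--         if answer == two[idx % len(two)]:
--             score[1] += 1
--         if answer == thr[idx % len(thr)]:
--             score[2] += 1
--
--     for idx, s in enumerate(score):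
--         if s == max(score):
--             result.append(idx+1)
--
--     return result
-- ===== SOURCE B (Python) =====
-- def solution(answers):
--     PERIOD = 40  # lcm of the pattern lengths 5, 8, 10
--     hist = {}
--     for i, a in enumerate(answers):
--         key = (i % PERIOD, a)
--         hist[key] = hist.get(key, 0) + 1
--     patterns = [[1, 2, 3, 4, 5],
--                 [2, 1, 2, 3, 2, 4, 2, 5],
--                 [3, 3, 1, 1, 2, 2, 4, 4, 5, 5]]
--     scores = [sum(hist.get((r, p[r % len(p)]), 0) for r in range(PERIOD))
--               for p in patterns]
--     best = max(scores)
--     return [i + 1 for i, s in enumerate(scores) if s == best]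
-- ===== Notes on version B (the rewrite author's own statement) =====
-- stated objective: alternative
-- what changed: A scans answers once comparing each element against all three cyclic patterns inline; B instead aggregates answers into a histogram keyed by (index mod 40, value) (40 = lcm of the pattern periods) and then reads each pattern's score off the histogram with 40 dictionary lookups, never comparing individual answers to patterns.
import Mathlib
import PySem

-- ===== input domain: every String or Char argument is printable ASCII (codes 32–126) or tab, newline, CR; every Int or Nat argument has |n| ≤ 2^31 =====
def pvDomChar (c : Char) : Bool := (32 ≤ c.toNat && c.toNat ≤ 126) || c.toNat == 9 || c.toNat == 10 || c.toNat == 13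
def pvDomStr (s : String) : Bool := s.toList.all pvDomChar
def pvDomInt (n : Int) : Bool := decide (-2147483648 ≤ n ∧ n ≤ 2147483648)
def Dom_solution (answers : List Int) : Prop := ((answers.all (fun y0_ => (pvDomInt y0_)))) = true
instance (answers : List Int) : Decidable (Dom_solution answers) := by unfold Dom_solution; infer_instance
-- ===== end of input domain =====

-- B replaces A's per-answer pattern comparisons with a histogram keyed by (index mod 40, value)
-- built in one pass, then scores each pattern by 40 dictionary lookups; objective: alternative.

-- ===== PORT A =====
def solution (answers : List Int) : List Int :=
  let one : List Int := [1, 2, 3, 4, 5]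
  let two : List Int := [2, 1, 2, 3, 2, 4, 2, 5]
  let thr : List Int := [3, 3, 1, 1, 2, 2, 4, 4, 5, 5]
  let score :=
    (PySem.List.enumerate answers).foldl
      (fun (s : Int × Int × Int) p =>
        let s0 := if p.2 = PySem.List.pyGetD one (PySem.Int.mod p.1 (one.length : Int)) 0 then s.1 + 1 else s.1
        let s1 := if p.2 = PySem.List.pyGetD two (PySem.Int.mod p.1 (two.length : Int)) 0 then s.2.1 + 1 else s.2.1
        let s2 := if p.2 = PySem.List.pyGetD thr (PySem.Int.mod p.1 (thr.length : Int)) 0 then s.2.2 + 1 else s.2.2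
        (s0, s1, s2))
      (0, 0, 0)
  let scoreL : List Int := [score.1, score.2.1, score.2.2]
  (PySem.List.enumerate scoreL).foldl
    (fun r p => if some p.2 = PySem.List.max? scoreL (fun y => y) then r ++ [p.1 + 1] else r) []

-- ===== PORT B =====
-- hist[(i % 40, a)] = hist.get((i % 40, a), 0) + 1  over enumerate(answers)
def pvHist (answers : List Int) : PySem.Dict (Int × Int) Int :=
  (PySem.List.enumerate answers).foldl
    (fun d q =>
      let key : Int × Int := (PySem.Int.mod q.1 40, q.2)
      d.insert key (d.getD key 0 + 1))
    PySem.Dict.empty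

-- sum(hist.get((r, p[r % len(p)]), 0) for r in range(40))
def pvScoreH (hist : PySem.Dict (Int × Int) Int) (p : List Int) : Int :=
  ((PySem.List.pyRange 0 40 1).map
     (fun r => hist.getD (r, PySem.List.pyGetD p (PySem.Int.mod r (p.length : Int)) 0) 0)).sum

def solution_alt (answers : List Int) : List Int :=
  let hist := pvHist answers
  let patterns : List (List Int) :=
    [[1, 2, 3, 4, 5], [2, 1, 2, 3, 2, 4, 2, 5], [3, 3, 1, 1, 2, 2, 4, 4, 5, 5]]
  let scores := patterns.map (fun p => pvScoreH hist p)
  let best := (PySem.List.max? scores (fun y => y)).getD 0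
  ((PySem.List.enumerate scores).filter (fun q => q.2 = best)).map (fun q => q.1 + 1)

-- ===== PRECONDITION & SPEC =====
def Spec_solution (answers : List Int) (out : List Int) : Prop := out = solution_alt answers
instance (answers : List Int) (out : List Int) : Decidable (Spec_solution answers out) := by unfold Spec_solution; infer_instance

-- ===== CLAIM (what is proved, stated in full; the proofs are below) =====
def Claim_equal_solution : Prop := ∀ (answers : List Int), Dom_solution answers → Spec_solution answers (solution answers)

-- ===== LEMMAS AND PROOFS =====

-- If (a, b) never occurs as (r, f r) for r in R, the indicator sum over R is 0.
theorem pv_ind_sum_zero (f : Int → Int) (R : List Int) (a b : Int) (ha : a ∉ R) :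
    (R.map (fun r => if ((r, f r) : Int × Int) = (a, b) then (1 : Int) else 0)).sum = 0 := by
  induction R with
  | nil => simp
  | cons r t ih =>
    have hra : r ≠ a := fun h => ha (h ▸ List.mem_cons_self)
    have hne : ((r, f r) : Int × Int) ≠ (a, b) := fun h => hra (congrArg Prod.fst h)
    rw [List.map_cons, List.sum_cons, if_neg hne, zero_add,
        ih (fun h => ha (List.mem_cons_of_mem _ h))]

-- Over a duplicate-free index list containing a, the indicator sum collapses to one test.
theorem pv_ind_sum (f : Int → Int) (R : List Int) (hR : R.Nodup) (a b : Int) (ha : a ∈ R) :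
    (R.map (fun r => if ((r, f r) : Int × Int) = (a, b) then (1 : Int) else 0)).sum
      = if b = f a then 1 else 0 := by
  induction R with
  | nil => simp at ha
  | cons r t ih =>
    rcases List.nodup_cons.mp hR with ⟨hrt, hnd⟩
    by_cases hra : r = a
    · subst hra
      rw [List.map_cons, List.sum_cons, pv_ind_sum_zero f t r b hrt]
      simp [eq_comm]
    · have hat : a ∈ t := by
        rcases List.mem_cons.mp ha with h | h
        · exact absurd h.symm hra
        · exact h
      have hne : ((r, f r) : Int × Int) ≠ (a, b) := fun h => hra (congrArg Prod.fst h)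
      rw [List.map_cons, List.sum_cons, if_neg hne, zero_add, ih hnd hat]

-- Summing counts of (r, f r) over range(40) equals summing per-element indicators,
-- when every first component lies in [0, 40).
theorem pv_count_sum (f : Int → Int) (L : List (Int × Int))
    (hL : ∀ q ∈ L, 0 ≤ q.1 ∧ q.1 < 40) :
    ((PySem.List.pyRange 0 40 1).map
        (fun r => (L.count ((r, f r) : Int × Int) : Int))).sum
      = (L.map (fun q => if q.2 = f q.1 then (1 : Int) else 0)).sum := by
  induction L with
  | nil => simp
  | cons x t ih =>
    have hx := hL x List.mem_cons_self
    have ht : ∀ q ∈ t, 0 ≤ q.1 ∧ q.1 < 40 := fun q hq => hL q (List.mem_cons_of_mem _ hq)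
    have hxR : x.1 ∈ PySem.List.pyRange 0 40 1 := by
      rw [PySem.List.mem_pyRange_one]; exact hx
    have hcount : ∀ r : Int,
        ((x :: t).count ((r, f r) : Int × Int) : Int)
          = (t.count ((r, f r) : Int × Int) : Int)
            + (if ((r, f r) : Int × Int) = x then (1 : Int) else 0) := by
      intro r
      by_cases h : ((r, f r) : Int × Int) = x
      · simp [h]
      · have h' : ¬ x = ((r, f r) : Int × Int) := fun hh => h hh.symm
        simp [h, h']
    calc ((PySem.List.pyRange 0 40 1).map
            (fun r => ((x :: t).count ((r, f r) : Int × Int) : Int))).sum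
        = ((PySem.List.pyRange 0 40 1).map
            (fun r => (t.count ((r, f r) : Int × Int) : Int)
              + (if ((r, f r) : Int × Int) = x then (1 : Int) else 0))).sum := by
          apply congrArg List.sum
          exact List.map_congr_left (fun r _ => hcount r)
      _ = ((PySem.List.pyRange 0 40 1).map
            (fun r => (t.count ((r, f r) : Int × Int) : Int))).sum
          + ((PySem.List.pyRange 0 40 1).map
            (fun r => if ((r, f r) : Int × Int) = x then (1 : Int) else 0)).sum := by
          rw [← List.sum_map_add]
      _ = (t.map (fun q => if q.2 = f q.1 then (1 : Int) else 0)).sum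
          + (if x.2 = f x.1 then (1 : Int) else 0) := by
          rw [ih ht, pv_ind_sum f _ (PySem.List.nodup_pyRange_one 0 40) x.1 x.2 hxR]
      _ = ((x :: t).map (fun q => if q.2 = f q.1 then (1 : Int) else 0)).sum := by
          simp [add_comm]
  
-- Reducing an index mod 40 does not change a lookup in a pattern whose length divides 40.
theorem pv_mod_mod (p : List Int) (hp : 0 < p.length) (hd : (p.length : Int) ∣ 40) (i : Int) :
    PySem.Int.mod (PySem.Int.mod i 40) (p.length : Int) = PySem.Int.mod i (p.length : Int) := by
  have h40 : (0 : Int) < 40 := by norm_num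
  have hpl : (0 : Int) < (p.length : Int) := by exact_mod_cast hp
  simp only [PySem.Int.mod_eq_emod_of_pos hpl, PySem.Int.mod_eq_emod_of_pos h40]
  exact Int.emod_emod_of_dvd _ hd

-- B's histogram score for a pattern equals the direct per-answer indicator sum.
theorem pv_score_eq (answers : List Int) (p : List Int)
    (hp : 0 < p.length) (hd : (p.length : Int) ∣ 40) :
    pvScoreH (pvHist answers) p
      = ((PySem.List.enumerate answers).map
          (fun q => if q.2 = PySem.List.pyGetD p (PySem.Int.mod q.1 (p.length : Int)) 0
                    then (1 : Int) else 0)).sum := by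
  have hgetD : ∀ k : Int × Int,
      (pvHist answers).getD k 0
        = (((PySem.List.enumerate answers).map
             (fun q => ((PySem.Int.mod q.1 40, q.2) : Int × Int))).count k : Int) := by
    intro k
    have h0 : pvHist answers
        = ((PySem.List.enumerate answers).map
            (fun q => ((PySem.Int.mod q.1 40, q.2) : Int × Int))).foldl
            (fun d key => d.insert key (d.getD key 0 + 1)) PySem.Dict.empty := by
      unfold pvHist
      rw [List.foldl_map]
    rw [h0, PySem.Dict.getD_foldl_insert_add_one]
    simp
  unfold pvScoreH
  set f : Int → Int := fun r => PySem.List.pyGetD p (PySem.Int.mod r (p.length : Int)) 0 with hf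
  set L : List (Int × Int) :=
    (PySem.List.enumerate answers).map (fun q => ((PySem.Int.mod q.1 40, q.2) : Int × Int)) with hLdef
  have h1 : ((PySem.List.pyRange 0 40 1).map
      (fun r => (pvHist answers).getD (r, f r) 0)).sum
      = ((PySem.List.pyRange 0 40 1).map (fun r => (L.count ((r, f r) : Int × Int) : Int))).sum := by
    apply congrArg List.sum
    exact List.map_congr_left (fun r _ => hgetD (r, f r))
  have hL : ∀ q ∈ L, 0 ≤ q.1 ∧ q.1 < 40 := by
    intro q hq
    rw [hLdef] at hq
    rcases List.mem_map.mp hq with ⟨w, _, hw⟩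
    subst hw
    exact ⟨PySem.Int.mod_nonneg _ (by norm_num), PySem.Int.mod_lt _ (by norm_num)⟩
  rw [h1, pv_count_sum f L hL, hLdef, List.map_map]
  apply congrArg List.sum
  apply List.map_congr_left
  intro q _
  have hmod40 : PySem.Int.mod q.1 40 = q.1 % 40 :=
    PySem.Int.mod_eq_emod_of_pos (by norm_num)
  have hmm2 : PySem.Int.mod (q.1 % 40) (p.length : Int) = PySem.Int.mod q.1 (p.length : Int) :=
    hmod40 ▸ pv_mod_mod p hp hd q.1
  simp [hf, hmm2]

-- A's combined fold over the enumerated answers computes the three per-pattern sums at once.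
theorem pv_fold_eq (one two thr : List Int) (l : List (Int × Int)) (x y z : Int) :
    l.foldl
      (fun (s : Int × Int × Int) p =>
        let s0 := if p.2 = PySem.List.pyGetD one (PySem.Int.mod p.1 (one.length : Int)) 0 then s.1 + 1 else s.1
        let s1 := if p.2 = PySem.List.pyGetD two (PySem.Int.mod p.1 (two.length : Int)) 0 then s.2.1 + 1 else s.2.1
        let s2 := if p.2 = PySem.List.pyGetD thr (PySem.Int.mod p.1 (thr.length : Int)) 0 then s.2.2 + 1 else s.2.2
        (s0, s1, s2))
      (x, y, z)
    = (x + ((l.map (fun q => if q.2 = PySem.List.pyGetD one (PySem.Int.mod q.1 (one.length : Int)) 0 then (1 : Int) else 0)).sum),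
       y + ((l.map (fun q => if q.2 = PySem.List.pyGetD two (PySem.Int.mod q.1 (two.length : Int)) 0 then (1 : Int) else 0)).sum),
       z + ((l.map (fun q => if q.2 = PySem.List.pyGetD thr (PySem.Int.mod q.1 (thr.length : Int)) 0 then (1 : Int) else 0)).sum)) := by
  induction l generalizing x y z with
  | nil => simp
  | cons h t ih =>
    simp only [List.foldl_cons, List.map_cons, List.sum_cons, ih]
    split_ifs <;> simp [add_assoc]

-- Appending idx+1 for each matching element is filter-then-map.
theorem pv_fold_filter (m : Int) (l : List (Int × Int)) (acc : List Int) :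
    l.foldl (fun r p => if p.2 = m then r ++ [p.1 + 1] else r) acc
      = acc ++ (l.filter (fun q => q.2 = m)).map (fun q => q.1 + 1) := by
  induction l generalizing acc with
  | nil => simp
  | cons h t ih =>
    by_cases hc : h.2 = m <;> simp [hc, ih]

-- A's second loop over the three scores equals B's filter/map with best = max.
theorem pv_select_eq (a b c : Int) :
    (PySem.List.enumerate ([a, b, c] : List Int)).foldl
      (fun r p => if some p.2 = PySem.List.max? ([a, b, c] : List Int) (fun y => y) then r ++ [p.1 + 1] else r) []
    = ((PySem.List.enumerate ([a, b, c] : List Int)).filter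
        (fun q => q.2 = (PySem.List.max? ([a, b, c] : List Int) (fun y => y)).getD 0)).map (fun q => q.1 + 1) := by
  rcases hM : PySem.List.max? ([a, b, c] : List Int) (fun y => y) with _ | m
  · simp [PySem.List.max?_id_cons] at hM
  · simp only [Option.some.injEq, Option.getD_some]
    rw [pv_fold_filter m]
    exact List.nil_append _

-- ===== VERDICT (by name: the statement is the Claim_ definition above) =====
theorem solution_spec : Claim_equal_solution := by
  unfold Claim_equal_solution Spec_solution
  intro answers _
  unfold solution solution_alt
  simp only [List.map_cons, List.map_nil]
  rw [pv_fold_eq]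
  simp only [zero_add]
  simp only [pv_score_eq answers [1, 2, 3, 4, 5] (by norm_num) (by norm_num),
      pv_score_eq answers [2, 1, 2, 3, 2, 4, 2, 5] (by norm_num) (by norm_num),
      pv_score_eq answers [3, 3, 1, 1, 2, 2, 4, 4, 5, 5] (by norm_num) (by norm_num)]
  exact pv_select_eq _ _ _
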